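-- pv_equiv track=rewrite | github.com/hiniko/How2Pay | scheduler/cash_flow.py | _adjust_month_year
-- ===== SOURCE A (Python) =====
-- from typing import List, Tuple
--
-- def _adjust_month_year(month: int, year: int) -> Tuple[int, int]:
--     """Handle month/year rollover (e.g., month 13 -> month 1, year+1)."""
--     adjusted_year = year
--     adjusted_month = month
--     while adjusted_month > 12:
--         adjusted_month -= 12
--         adjusted_year += 1
--     while adjusted_month < 1:
--         adjusted_month += 12
--         adjusted_year -= 1
--     return adjusted_month, adjusted_year
-- ===== SOURCE B (Python) =====
-- def _adjust_month_year(month: int, year: int):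
--     """Handle month/year rollover via floor division instead of loops."""
--     index = month - 1
--     return index % 12 + 1, year + index // 12
-- ===== Notes on version B (the rewrite author's own statement) =====
-- stated objective: faster
-- what changed: Replaces the two while loops with a single closed-form floor-division/modulo computation on month-1.
import Mathlib
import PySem

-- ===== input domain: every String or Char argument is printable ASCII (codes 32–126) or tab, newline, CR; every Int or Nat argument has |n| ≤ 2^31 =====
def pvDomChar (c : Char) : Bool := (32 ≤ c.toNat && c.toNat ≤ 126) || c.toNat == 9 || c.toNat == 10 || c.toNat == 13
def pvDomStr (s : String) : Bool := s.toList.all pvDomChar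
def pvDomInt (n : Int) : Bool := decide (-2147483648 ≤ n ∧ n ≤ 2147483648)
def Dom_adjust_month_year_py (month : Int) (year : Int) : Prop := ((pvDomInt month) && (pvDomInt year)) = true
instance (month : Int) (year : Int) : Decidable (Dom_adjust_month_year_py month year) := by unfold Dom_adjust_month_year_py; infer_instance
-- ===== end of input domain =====

-- B replaces A's two rollover while-loops by one closed-form floor-division/modulo computation on month-1 (O(1) instead of O(|month|)).


-- ===== PORT A =====
-- termination helpers for the two while loops (cited by name in decreasing_by)
theorem pvDecGT (m : Int) (h : m > 12) : (m - 12 - 12).toNat < (m - 12).toNat :=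
  (Int.toNat_lt_toNat (Int.sub_pos.mpr h)).mpr (sub_lt_self (m - 12) (by norm_num))

theorem pvDecLT (m : Int) (h : m < 1) : (1 - (m + 12)).toNat < (1 - m).toNat :=
  (Int.toNat_lt_toNat (Int.sub_pos.mpr h)).mpr
    (by rw [sub_add_eq_sub_sub]; exact sub_lt_self (1 - m) (by norm_num))

-- while adjusted_month > 12: adjusted_month -= 12; adjusted_year += 1
def pvLoopGT12 (m y : Int) : Int × Int :=
  if m > 12 then pvLoopGT12 (m - 12) (y + 1) else (m, y)
termination_by (m - 12).toNat
decreasing_by exact pvDecGT m (by assumption)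

-- while adjusted_month < 1: adjusted_month += 12; adjusted_year -= 1
def pvLoopLT1 (m y : Int) : Int × Int :=
  if m < 1 then pvLoopLT1 (m + 12) (y - 1) else (m, y)
termination_by (1 - m).toNat
decreasing_by exact pvDecLT m (by assumption)

def adjust_month_year_py (month : Int) (year : Int) : Int × Int :=
  let p := pvLoopGT12 month year
  pvLoopLT1 p.1 p.2

-- ===== PORT B =====
-- B: closed form — index = month - 1; (index % 12 + 1, year + index // 12)
def adjust_month_year_py_alt (month : Int) (year : Int) : Int × Int :=
  let index := month - 1
  (PySem.Int.mod index 12 + 1, year + PySem.Int.floordiv index 12)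

-- ===== PRECONDITION & SPEC =====
def Spec_adjust_month_year_py (month : Int) (year : Int) (out : Int × Int) : Prop := out = adjust_month_year_py_alt month year
instance (month : Int) (year : Int) (out : Int × Int) : Decidable (Spec_adjust_month_year_py month year out) := by unfold Spec_adjust_month_year_py; infer_instance

-- ===== CLAIM (what is proved, stated in full; the proofs are below) =====
def Claim_equal_adjust_month_year_py : Prop := ∀ (month : Int) (year : Int), Dom_adjust_month_year_py month year → Spec_adjust_month_year_py month year (adjust_month_year_py month year)

-- ===== LEMMAS AND PROOFS =====

theorem pvLoopLT1_closed (m y : Int) (h : m ≤ 12) :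
    pvLoopLT1 m y = ((m - 1) % 12 + 1, y + (m - 1) / 12) := by
  induction m, y using pvLoopLT1.induct with
  | case1 m y hm ih =>
    rw [pvLoopLT1, if_pos hm, ih (by omega)]
    simp only [Prod.mk.injEq]; constructor <;> omega
  | case2 m y hm =>
    rw [pvLoopLT1, if_neg hm]
    simp only [Prod.mk.injEq]; constructor <;> omega

theorem pvA_closed (m y : Int) :
    adjust_month_year_py m y = ((m - 1) % 12 + 1, y + (m - 1) / 12) := by
  induction m, y using pvLoopGT12.induct with
  | case1 m y hm ih =>
    have : adjust_month_year_py m y = adjust_month_year_py (m - 12) (y + 1) := by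
      unfold adjust_month_year_py
      rw [pvLoopGT12, if_pos hm]
    rw [this, ih]
    simp only [Prod.mk.injEq]; constructor <;> omega
  | case2 m y hm =>
    unfold adjust_month_year_py
    rw [pvLoopGT12, if_neg hm]
    exact pvLoopLT1_closed m y (by omega)

-- ===== VERDICT (by name: the statement is the Claim_ definition above) =====
theorem adjust_month_year_py_spec : Claim_equal_adjust_month_year_py := by
  intro month year _
  unfold Spec_adjust_month_year_py adjust_month_year_py_alt
  rw [pvA_closed]
  simp only [PySem.Int.mod_eq_emod_of_pos (by norm_num : (0:Int) < 12),
    PySem.Int.floordiv_eq_ediv_of_pos (by norm_num : (0:Int) < 12)]
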